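-- pv_equiv track=rewrite | github.com/TomasTex/FP-Project-1 | Projeto1Final.py | validar_cifra
-- ===== SOURCE A (Python) =====
-- def obter_dicionario_de_chars(palavra: str) -> dict:
--
--     """ vai criar um dicionario inde se pode ver o nº de ocorrencias de uma letra.
--
--     Args:
--         palavra (str): [palavra dada]
--
--     Returns:
--         dict: [dicionario com as ocorrencias]
--     """
--     dicionario = {}
--
--     for caracter in palavra.lower(): #não é case-sensitive
--         dicionario[caracter] = dicionario.setdefault(caracter, 0) + 1
--
--     return dicionario
--
-- def validar_cifra(cifra: str, sequencia_controlo: str) -> bool: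
--     dicionario = obter_dicionario_de_chars(cifra)
--     dicionario.pop('-', False)
--
--     chars_count = list(dicionario.items())
--     len_chars_count = len(chars_count)
--
--     # bubble sort: https://realpython.com/sorting-algorithms-python/#the-bubble-sort-algorithm-in-python
--     for i in range(len_chars_count):
--         ordenado = True
--
--         for j in range(len_chars_count - i - 1):
--             char1, count_char1 = chars_count[j]
--             char2, count_char2 = chars_count[j + 1]
--
--             if count_char2 > count_char1 or (count_char1 == count_char2 and char1 > char2):
--                 chars_count[j], chars_count[j + 1] = chars_count[j + 1], chars_count[j]
--                 ordenado = False
--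
--         if ordenado:
--             break
--
--     chars = ''
--     for entry in chars_count[:5]:
--         chars += entry[0]
--
--     return '[' + chars + ']' == sequencia_controlo
-- ===== SOURCE B (Python) =====
-- def validar_cifra(cifra: str, sequencia_controlo: str) -> bool:
--     # Selection of the top-5 entries by repeated best-scan instead of fully bubble-sorting all entries.
--     counts = {}
--     for ch in cifra.lower():
--         counts[ch] = counts.get(ch, 0) + 1
--     counts.pop('-', None)
--
--     items = list(counts.items())
--     chars = []
--     for _ in range(5):
--         if not items:
--             break
--         best = items[0]
--         for it in items[1:]:
--             if it[1] > best[1] or (it[1] == best[1] and it[0] < best[0]):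
--                 best = it
--         chars.append(best[0])
--         items.remove(best)
--
--     return '[' + ''.join(chars) + ']' == sequencia_controlo
-- ===== Notes on version B (the rewrite author's own statement) =====
-- stated objective: alternative
-- what changed: Replaces A's bubble sort of all distinct-character counts followed by taking the first 5 with a partial selection that scans the remaining items at most 5 times for the best (count-descending, char-ascending) entry and removes it.
import Mathlib
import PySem

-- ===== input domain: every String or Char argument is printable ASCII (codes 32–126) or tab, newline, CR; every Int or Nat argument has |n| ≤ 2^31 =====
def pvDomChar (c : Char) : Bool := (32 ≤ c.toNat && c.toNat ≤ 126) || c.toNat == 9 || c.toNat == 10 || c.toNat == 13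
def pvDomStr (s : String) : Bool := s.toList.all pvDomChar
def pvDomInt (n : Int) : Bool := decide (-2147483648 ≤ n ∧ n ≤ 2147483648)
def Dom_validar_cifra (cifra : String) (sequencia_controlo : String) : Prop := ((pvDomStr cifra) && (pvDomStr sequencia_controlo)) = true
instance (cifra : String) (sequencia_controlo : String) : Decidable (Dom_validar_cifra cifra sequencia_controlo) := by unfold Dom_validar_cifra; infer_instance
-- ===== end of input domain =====

-- B replaces A's bubble sort of all counted letters by a partial selection of just the top 5 (repeated best-scan); return values proved equal on all inputs.

-- ===== PORT A =====
-- dicionario[caracter] = dicionario.setdefault(caracter, 0) + 1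
def pvStepA (d : PySem.Dict Char Int) (c : Char) : PySem.Dict Char Int :=
  let d1 := d.setdefault c 0
  d1.insert c (d1.getD c 0 + 1)

def pvCountA (palavra : String) : PySem.Dict Char Int :=
  (PySem.Str.lower palavra).toList.foldl pvStepA PySem.Dict.empty

-- swap condition: count_char2 > count_char1 or (count_char1 == count_char2 and char1 > char2)
def pvSwapB (a b : Char × Int) : Bool := (a.2 < b.2) || (a.2 == b.2 && b.1 < a.1)

-- inner loop 'for j in range(len - i - 1)': fuel = number of adjacent comparisons; Bool = ordenado
def pvBPass : Nat → List (Char × Int) → List (Char × Int) × Bool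
  | 0, l => (l, true)
  | _ + 1, [] => ([], true)
  | _ + 1, [a] => ([a], true)
  | f + 1, a :: b :: rest =>
    if pvSwapB a b then (b :: (pvBPass f (a :: rest)).1, false)
    else (a :: (pvBPass f (b :: rest)).1, (pvBPass f (b :: rest)).2)

-- outer loop 'for i in range(len)': remaining iterations k = len - i, pass fuel = k - 1; break when ordenado
def pvBLoop : Nat → List (Char × Int) → List (Char × Int)
  | 0, l => l
  | k + 1, l =>
    let p := pvBPass k l
    if p.2 then p.1 else pvBLoop k p.1

def validar_cifra (cifra : String) (sequencia_controlo : String) : Bool :=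
  let dicionario := (pvCountA cifra).erase '-'   -- dicionario.pop('-', False)
  let chars_count := dicionario.items
  let len_chars_count := chars_count.length
  let sorted := pvBLoop len_chars_count chars_count
  let chars := (sorted.take 5).foldl (fun s e => s.push e.1) ""
  ("[" ++ chars ++ "]") == sequencia_controlo

-- ===== PORT B =====
def pvStepB (d : PySem.Dict Char Int) (c : Char) : PySem.Dict Char Int :=
  d.insert c (d.getD c 0 + 1)    -- counts[ch] = counts.get(ch, 0) + 1

def pvCountB (cifra : String) : PySem.Dict Char Int :=
  (PySem.Str.lower cifra).toList.foldl pvStepB PySem.Dict.empty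

-- it[1] > best[1] or (it[1] == best[1] and it[0] < best[0])
def pvBetterB (it acc : Char × Int) : Bool := (acc.2 < it.2) || (it.2 == acc.2 && it.1 < acc.1)

-- best = items[0]; for it in items[1:]: …
def pvScanBest (b : Char × Int) (l : List (Char × Int)) : Char × Int :=
  l.foldl (fun acc it => if pvBetterB it acc then it else acc) b

-- for _ in range(5): if not items: break; pick best; items.remove(best)
-- items.remove(best) ported as List.erase: best ∈ items always, so this is exact
-- (PySem.List.remove?_eq_some_erase).
def pvSelect : Nat → List (Char × Int) → List Char
  | 0, _ => []
  | _ + 1, [] => []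
  | k + 1, x :: xs =>
    let b := pvScanBest x xs
    b.1 :: pvSelect k ((x :: xs).erase b)

def validar_cifra_alt (cifra : String) (sequencia_controlo : String) : Bool :=
  let items := ((pvCountB cifra).erase '-').items   -- counts.pop('-', None)
  let chars := pvSelect 5 items
  ("[" ++ String.ofList chars ++ "]") == sequencia_controlo

-- ===== PRECONDITION & SPEC =====
def Spec_validar_cifra (cifra : String) (sequencia_controlo : String) (out : Bool) : Prop := out = validar_cifra_alt cifra sequencia_controlo
instance (cifra : String) (sequencia_controlo : String) (out : Bool) : Decidable (Spec_validar_cifra cifra sequencia_controlo out) := by unfold Spec_validar_cifra; infer_instance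

-- ===== CLAIM (what is proved, stated in full; the proofs are below) =====
def Claim_equal_validar_cifra : Prop := ∀ (cifra : String) (sequencia_controlo : String), Dom_validar_cifra cifra sequencia_controlo → Spec_validar_cifra cifra sequencia_controlo (validar_cifra cifra sequencia_controlo)

-- ===== LEMMAS AND PROOFS =====

-- the sort order: count descending, then char ascending
def pvLe (a b : Char × Int) : Prop := b.2 < a.2 ∨ (a.2 = b.2 ∧ a.1 ≤ b.1)

theorem pvLe_refl (a : Char × Int) : pvLe a a := Or.inr ⟨rfl, le_refl _⟩

theorem pvLe_trans {a b c : Char × Int} (h1 : pvLe a b) (h2 : pvLe b c) : pvLe a c := by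
  rcases h1 with h1 | ⟨h1, h1'⟩ <;> rcases h2 with h2 | ⟨h2, h2'⟩
  · exact Or.inl (lt_trans h2 h1)
  · exact Or.inl (h2 ▸ h1)
  · exact Or.inl (h1 ▸ h2)
  · exact Or.inr ⟨h1.trans h2, h1'.trans h2'⟩

theorem pvLe_antisymm {a b : Char × Int} (h1 : pvLe a b) (h2 : pvLe b a) : a = b := by
  rcases h1 with h1 | ⟨h1, h1'⟩ <;> rcases h2 with h2 | ⟨h2, h2'⟩
  · exact absurd h1 (lt_asymm h2)
  · omega
  · omega
  · exact Prod.ext (le_antisymm h1' h2') h1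

theorem pvSwapB_false {a b : Char × Int} (h : pvSwapB a b = false) : pvLe a b := by
  simp [pvSwapB] at h
  by_cases hc : a.2 = b.2
  · exact Or.inr ⟨hc, h.2 hc⟩
  · exact Or.inl (lt_of_le_of_ne h.1 (fun e => hc e.symm))

theorem pvSwapB_true {a b : Char × Int} (h : pvSwapB a b = true) : pvLe b a := by
  simp [pvSwapB] at h
  rcases h with h | ⟨h, h'⟩
  · exact Or.inl h
  · exact Or.inr ⟨h.symm, le_of_lt h'⟩

theorem pvBetterB_true {it acc : Char × Int} (h : pvBetterB it acc = true) : pvLe it acc := by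
  simp [pvBetterB] at h
  rcases h with h | ⟨h, h'⟩
  · exact Or.inl h
  · exact Or.inr ⟨h, le_of_lt h'⟩

theorem pvBetterB_false {it acc : Char × Int} (h : pvBetterB it acc = false) : pvLe acc it := by
  simp [pvBetterB] at h
  by_cases hc : it.2 = acc.2
  · exact Or.inr ⟨hc.symm, h.2 hc⟩
  · exact Or.inl (lt_of_le_of_ne h.1 hc)

-- full bubble pass (no fuel): pvBPass restricted fuel = full pass on the prefix
def pvFullPass : List (Char × Int) → List (Char × Int) × Bool
  | [] => ([], true)
  | [a] => ([a], true)
  | a :: b :: rest =>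
    if pvSwapB a b then (b :: (pvFullPass (a :: rest)).1, false)
    else (a :: (pvFullPass (b :: rest)).1, (pvFullPass (b :: rest)).2)

theorem pvBPass_eq_full (f : Nat) (l : List (Char × Int)) :
    pvBPass f l = ((pvFullPass (l.take (f + 1))).1 ++ l.drop (f + 1), (pvFullPass (l.take (f + 1))).2) := by
  induction f generalizing l with
  | zero =>
    match l with
    | [] => simp [pvBPass, pvFullPass]
    | [a] => simp [pvBPass, pvFullPass]
    | a :: b :: rest => simp [pvBPass, pvFullPass]
  | succ f ih =>
    match l with
    | [] => simp [pvBPass, pvFullPass]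
    | [a] => simp [pvBPass, pvFullPass]
    | a :: b :: rest =>
      simp only [pvBPass, pvFullPass, List.take, List.drop]
      by_cases h : pvSwapB a b = true
      · simp [h, ih (a :: rest)]
      · simp [h, ih (b :: rest)]

theorem pvFullPass_perm (l : List (Char × Int)) : (pvFullPass l).1.Perm l := by
  induction l using pvFullPass.induct with
  | case1 => simp [pvFullPass]
  | case2 a => simp [pvFullPass]
  | case3 a b rest h ih =>
    simp only [pvFullPass, h, if_true]
    exact (ih.cons b).trans (List.Perm.swap a b rest)
  | case4 a b rest h ih =>
    simp only [pvFullPass, h]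
    simp only [Bool.false_eq_true, if_false]
    exact ih.cons a

theorem pvFullPass_sorted_of_flag (l : List (Char × Int)) (h : (pvFullPass l).2 = true) :
    (pvFullPass l).1 = l ∧ l.Pairwise pvLe := by
  induction l using pvFullPass.induct with
  | case1 => simp [pvFullPass]
  | case2 a => simp [pvFullPass]
  | case3 a b rest hs ih =>
    simp [pvFullPass, hs] at h
  | case4 a b rest hs ih =>
    have hs' : pvSwapB a b = false := by simpa using hs
    simp only [pvFullPass, hs'] at h ⊢
    simp only [Bool.false_eq_true, if_false] at h ⊢
    obtain ⟨h1, h2⟩ := ih h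
    have hab : pvLe a b := pvSwapB_false hs'
    refine ⟨by rw [h1], List.Pairwise.cons ?_ h2⟩
    intro y hy
    rcases List.mem_cons.mp hy with rfl | hy
    · exact hab
    · exact pvLe_trans hab (List.rel_of_pairwise_cons h2 hy)

theorem pvFullPass_last (a : Char × Int) (l : List (Char × Int)) :
    ∃ m q, (pvFullPass (a :: l)).1 = q ++ [m] ∧ (∀ x ∈ a :: l, pvLe x m) ∧ q.length = l.length := by
  induction l generalizing a with
  | nil =>
    refine ⟨a, [], by simp [pvFullPass], ?_, rfl⟩
    intro x hx; simp at hx; simp [hx, pvLe_refl]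
  | cons b rest ih =>
    by_cases h : pvSwapB a b = true
    · obtain ⟨m, q, h1, h2, h3⟩ := ih a
      refine ⟨m, b :: q, by simp [pvFullPass, h, h1], ?_, by simp [h3]⟩
      intro x hx
      simp only [List.mem_cons] at hx
      rcases hx with rfl | rfl | hx
      · exact h2 x (by simp)
      · exact pvLe_trans (pvSwapB_true h) (h2 a (by simp))
      · exact h2 x (by simp [hx])
    · obtain ⟨m, q, h1, h2, h3⟩ := ih b
      have h' : pvSwapB a b = false := by simpa using h
      refine ⟨m, a :: q, by simp [pvFullPass, h', h1], ?_, by simp [h3]⟩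
      intro x hx
      simp only [List.mem_cons] at hx
      rcases hx with rfl | hx
      · exact pvLe_trans (pvSwapB_false h') (h2 b (by simp))
      · exact h2 x (by simpa using hx)

-- invariant for the shrinking passes
def pvGood (k : Nat) (l : List (Char × Int)) : Prop :=
  (l.drop k).Pairwise pvLe ∧ ∀ x ∈ l.take k, ∀ y ∈ l.drop k, pvLe x y

theorem pvBLoop_sorted (k : Nat) (l : List (Char × Int)) (hg : pvGood k l) :
    (pvBLoop k l).Perm l ∧ (pvBLoop k l).Pairwise pvLe := by
  induction k generalizing l with
  | zero => exact ⟨List.Perm.refl l, by simpa [pvGood] using hg.1⟩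
  | succ k ih =>
    obtain ⟨hd, hc⟩ := hg
    simp only [pvBLoop, pvBPass_eq_full k l]
    by_cases hf : (pvFullPass (l.take (k + 1))).2 = true
    · obtain ⟨he, hpw⟩ := pvFullPass_sorted_of_flag _ hf
      simp only [hf, if_true, he]
      constructor
      · rw [List.take_append_drop]
      · refine List.pairwise_append.mpr ⟨hpw, hd, ?_⟩
        intro x hx y hy
        exact hc x hx y hy
    · simp only [hf, if_false, Bool.false_eq_true]
      by_cases hlen : l.length ≤ k
      · have hpre : l.take (k + 1) = l := List.take_of_length_le (by omega)
        have hsuf : l.drop (k + 1) = [] := List.drop_eq_nil_of_le (by omega)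
        have hperm1 := pvFullPass_perm (l.take (k + 1))
        have hgood : pvGood k ((pvFullPass (l.take (k + 1))).1 ++ l.drop (k + 1)) := by
          have hlen' : ((pvFullPass (l.take (k + 1))).1 ++ l.drop (k + 1)).length ≤ k := by
            rw [hsuf, List.append_nil, hperm1.length_eq, List.length_take]
            omega
          constructor
          · rw [List.drop_eq_nil_of_le hlen']
            exact List.Pairwise.nil
          · intro x hx y hy
            rw [List.drop_eq_nil_of_le hlen'] at hy
            simp at hy
        obtain ⟨p1, p2⟩ := ih _ hgood
        refine ⟨p1.trans ?_, p2⟩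
        rw [hsuf]
        simpa [hpre] using hperm1
      · obtain ⟨x, t, hxt⟩ : ∃ x t, l.take (k + 1) = x :: t := by
          match hpre : l.take (k + 1) with
          | [] =>
            exfalso
            have h5 : (l.take (k + 1)).length = min (k + 1) l.length := List.length_take
            rw [hpre] at h5
            simp at h5
            omega
          | x :: t => exact ⟨x, t, rfl⟩
        obtain ⟨m, q, h1, h2, h3⟩ := pvFullPass_last x t
        have hlpre : (l.take (k + 1)).length = k + 1 := by
          have h5 : (l.take (k + 1)).length = min (k + 1) l.length := List.length_take
          omega
        have hq : q.length = k := by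
          have h4 := congrArg List.length hxt
          rw [hlpre] at h4
          simp at h4
          omega
        have hfp : (pvFullPass (l.take (k + 1))).1 = q ++ [m] := by rw [hxt]; exact h1
        have hmax : ∀ z ∈ l.take (k + 1), pvLe z m := by rw [hxt]; exact h2
        have hpermp : (q ++ [m]).Perm (l.take (k + 1)) := hfp ▸ pvFullPass_perm (l.take (k + 1))
        have hdk : ((q ++ [m]) ++ l.drop (k + 1)).drop k = m :: l.drop (k + 1) := by
          rw [List.append_assoc]
          exact List.drop_left' hq
        have htk : ((q ++ [m]) ++ l.drop (k + 1)).take k = q := by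
          rw [List.append_assoc]
          exact List.take_left' hq
        have hgood : pvGood k ((pvFullPass (l.take (k + 1))).1 ++ l.drop (k + 1)) := by
          rw [hfp]
          constructor
          · rw [hdk]
            refine List.Pairwise.cons ?_ hd
            intro y hy
            have hm : m ∈ l.take (k + 1) := hpermp.subset (by simp)
            exact hc m hm y hy
          · intro x' hx' y hy
            rw [htk] at hx'
            rw [hdk] at hy
            have hx'pre : x' ∈ l.take (k + 1) := hpermp.subset (by simp [hx'])
            rcases List.mem_cons.mp hy with rfl | hy
            · exact hmax x' hx'pre
            · exact hc x' hx'pre y hy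
        obtain ⟨p1, p2⟩ := ih _ hgood
        refine ⟨p1.trans ?_, p2⟩
        rw [hfp]
        have hfin : ((q ++ [m]) ++ l.drop (k + 1)).Perm (l.take (k + 1) ++ l.drop (k + 1)) :=
          hpermp.append_right _
        rw [List.take_append_drop] at hfin
        exact hfin

theorem pvScanBest_mem (b : Char × Int) (l : List (Char × Int)) : pvScanBest b l ∈ b :: l := by
  induction l generalizing b with
  | nil => simp [pvScanBest]
  | cons y ys ih =>
    have hstep : pvScanBest b (y :: ys) = pvScanBest (if pvBetterB y b then y else b) ys := rfl
    rw [hstep]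
    rcases List.mem_cons.mp (ih (if pvBetterB y b then y else b)) with h | h
    · by_cases hb : pvBetterB y b = true
      · simp [hb] at h; simp [hb, h]
      · simp [hb] at h; simp [hb, h]
    · simp [h]

theorem pvScanBest_min (b : Char × Int) (l : List (Char × Int)) :
    ∀ x ∈ b :: l, pvLe (pvScanBest b l) x := by
  induction l generalizing b with
  | nil => intro x hx; simp at hx; subst hx; simp [pvScanBest, pvLe_refl]
  | cons y ys ih =>
    intro x hx
    have hstep : pvScanBest b (y :: ys) = pvScanBest (if pvBetterB y b then y else b) ys := rfl
    rw [hstep]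
    have hb : pvLe (if pvBetterB y b then y else b) b := by
      by_cases h : pvBetterB y b = true
      · simpa [h] using pvBetterB_true h
      · simpa [h] using pvLe_refl b
    have hy : pvLe (if pvBetterB y b then y else b) y := by
      by_cases h : pvBetterB y b = true
      · simpa [h] using pvLe_refl y
      · simpa [h] using pvBetterB_false (by simpa using h)
    have hscan : pvLe (pvScanBest (if pvBetterB y b then y else b) ys) (if pvBetterB y b then y else b) :=
      ih _ _ (by simp)
    simp only [List.mem_cons] at hx
    rcases hx with rfl | rfl | hx
    · exact pvLe_trans hscan hb
    · exact pvLe_trans hscan hy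
    · exact ih _ x (by simp [hx])

theorem pvSelect_eq (k : Nat) (l s : List (Char × Int)) (hp : l.Perm s) (hs : s.Pairwise pvLe) :
    pvSelect k l = (s.take k).map Prod.fst := by
  induction k generalizing l s with
  | zero => simp [pvSelect]
  | succ k ih =>
    cases l with
    | nil =>
      have : s = [] := hp.symm.eq_nil
      subst this
      simp [pvSelect]
    | cons x xs =>
      cases s with
      | nil => exact absurd hp.eq_nil (by simp)
      | cons m s' =>
        have hbmem : pvScanBest x xs ∈ x :: xs := pvScanBest_mem x xs
        have hmin : ∀ z ∈ x :: xs, pvLe (pvScanBest x xs) z := pvScanBest_min x xs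
        have hmmem : m ∈ x :: xs := hp.symm.subset (by simp)
        have hminS : ∀ z ∈ m :: s', pvLe m z := by
          intro z hz
          rcases List.mem_cons.mp hz with rfl | hz
          · exact pvLe_refl z
          · exact List.rel_of_pairwise_cons hs hz
        have hbm : pvScanBest x xs = m :=
          pvLe_antisymm (hmin m hmmem) (hminS _ (hp.subset hbmem))
        have hperm' : ((x :: xs).erase (pvScanBest x xs)).Perm s' := by
          rw [hbm]
          have := hp.erase m
          simpa [List.erase_cons_head] using this
        have hrec := ih ((x :: xs).erase (pvScanBest x xs)) s' hperm' hs.of_cons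
        rw [hbm] at hrec
        simp only [pvSelect, List.take, List.map]
        rw [hbm, hrec]

theorem pvStep_eq : pvStepA = pvStepB := by
  funext d c
  simp only [pvStepA, pvStepB]
  by_cases h : d.contains c = true
  · have hd1 : d.setdefault c 0 = d := by simp [PySem.Dict.setdefault, h]
    rw [hd1]
  · have hd1 : d.setdefault c 0 = d.insert c 0 := by
      simp [PySem.Dict.setdefault, PySem.Dict.insert, h]
    rw [hd1, PySem.Dict.getD_insert_self, PySem.Dict.insert_insert_self,
        PySem.Dict.getD_of_not_contains d 0 (by simpa using h)]

theorem pvFoldPush (L : List (Char × Int)) (s : String) :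
    (L.foldl (fun s e => s.push e.1) s).toList = s.toList ++ L.map Prod.fst := by
  induction L generalizing s with
  | nil => simp
  | cons e L ih => simp [ih, String.toList_push]

-- ===== VERDICT (by name: the statement is the Claim_ definition above) =====
set_option maxHeartbeats 1000000 in
theorem validar_cifra_spec : Claim_equal_validar_cifra := by
  unfold Claim_equal_validar_cifra Spec_validar_cifra
  intro cifra seq _
  unfold validar_cifra validar_cifra_alt
  dsimp only
  have hdict : pvCountA cifra = pvCountB cifra := by
    unfold pvCountA pvCountB
    rw [pvStep_eq]
  rw [hdict]
  have hgood : pvGood (((pvCountB cifra).erase '-').items).length (((pvCountB cifra).erase '-').items) := by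
    constructor
    · simp
    · intro x hx y hy
      simp at hy
  obtain ⟨hperm, hpw⟩ := pvBLoop_sorted _ _ hgood
  have hsel := pvSelect_eq 5 (((pvCountB cifra).erase '-').items) _ hperm.symm hpw
  rw [hsel]
  have hstr : ∀ L : List (Char × Int),
      L.foldl (fun s e => s.push e.1) "" = String.ofList (L.map Prod.fst) := by
    intro L
    apply String.toList_inj.mp
    rw [pvFoldPush]
    simp
  rw [hstr]
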